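-- pv_equiv track=rewrite | github.com/mikolajwojciuk/pico_obd | shift_light.py | split_led_into_segments
-- ===== SOURCE A (Python) =====
-- def split_led_into_segments(
--     n_pixels: int, n_segments: int
-- ) -> list[list[int]]:
--     k, m = divmod(len(range(n_pixels)), n_segments)
--     segments = list(
--         list(range(n_pixels))[i * k + min(i, m) : (i + 1) * k + min(i + 1, m)]
--         for i in range(n_segments)
--     )
--     return segments
-- ===== SOURCE B (Python) =====
-- def split_led_into_segments(
--     n_pixels: int, n_segments: int
-- ) -> list[list[int]]:
--     k, m = divmod(max(n_pixels, 0), n_segments)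
--     segments = []
--     start = 0
--     for i in range(n_segments):
--         size = k + 1 if i < m else k
--         segments.append(list(range(start, start + size)))
--         start += size
--     return segments
-- ===== Notes on version B (the rewrite author's own statement) =====
-- stated objective: faster
-- what changed: B threads a running cursor through one loop and emits each segment directly as range(start, start+size), instead of A's re-materialising list(range(n_pixels)) on every iteration and slicing it at closed-form bounds i*k+min(i,m).
import Mathlib
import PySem

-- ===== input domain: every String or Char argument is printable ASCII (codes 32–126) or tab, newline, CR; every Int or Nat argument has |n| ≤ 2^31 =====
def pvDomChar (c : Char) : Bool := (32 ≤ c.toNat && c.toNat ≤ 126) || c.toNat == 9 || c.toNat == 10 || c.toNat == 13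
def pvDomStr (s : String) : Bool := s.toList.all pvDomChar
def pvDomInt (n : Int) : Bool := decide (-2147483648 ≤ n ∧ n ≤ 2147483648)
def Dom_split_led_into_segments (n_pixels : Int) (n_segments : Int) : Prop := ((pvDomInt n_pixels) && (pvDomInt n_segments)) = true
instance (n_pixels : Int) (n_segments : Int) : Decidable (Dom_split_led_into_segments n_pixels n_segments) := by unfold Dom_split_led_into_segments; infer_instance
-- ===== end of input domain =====

-- B replaces A's slicing of a freshly rebuilt list(range(n_pixels)) at closed-form bounds by a
-- single cursor-threaded loop that emits each segment directly (faster: no per-segment rebuild).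

-- ===== PORT A =====
-- k, m = divmod(len(range(n_pixels)), n_segments); then for each i in range(n_segments)
-- take list(range(n_pixels))[i*k+min(i,m) : (i+1)*k+min(i+1,m)].
def split_led_into_segments (n_pixels : Int) (n_segments : Int) : List (List Int) :=
  -- len(range(n_pixels)) — Python computes this length in O(1): it is max n_pixels 0 = n_pixels.toNat
  match PySem.Int.divmod? ((n_pixels.toNat : Int)) n_segments with
  | none => []   -- ZeroDivisionError (n_segments = 0); excluded by Pre_
  | some (k, m) =>
    (PySem.List.pyRange 0 n_segments 1).map (fun i =>
      PySem.List.slice (PySem.List.pyRange 0 n_pixels 1)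
        (some (i * k + min i m)) (some ((i + 1) * k + min (i + 1) m)))

-- ===== PORT B =====
-- k, m = divmod(max(n_pixels, 0), n_segments); cursor loop appending range(start, start+size).
def split_led_into_segments_alt (n_pixels : Int) (n_segments : Int) : List (List Int) :=
  match PySem.Int.divmod? (max n_pixels 0) n_segments with
  | none => []   -- ZeroDivisionError (n_segments = 0); excluded by Pre_
  | some (k, m) =>
    ((PySem.List.pyRange 0 n_segments 1).foldl
      (fun (acc : List (List Int) × Int) i =>
        let size := if i < m then k + 1 else k
        (acc.1 ++ [PySem.List.pyRange acc.2 (acc.2 + size) 1], acc.2 + size))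
      ([], 0)).1

-- ===== PRECONDITION & SPEC =====
-- Pre_ excludes exactly n_segments = 0, where A raises ZeroDivisionError.
def Pre_split_led_into_segments (n_pixels : Int) (n_segments : Int) : Prop := n_segments ≠ 0
instance (n_pixels : Int) (n_segments : Int) : Decidable (Pre_split_led_into_segments n_pixels n_segments) := by unfold Pre_split_led_into_segments; infer_instance
def pvWitness_split_led_into_segments : Int × Int := (10, 3)

def Spec_split_led_into_segments (n_pixels : Int) (n_segments : Int) (out : List (List Int)) : Prop := out = split_led_into_segments_alt n_pixels n_segments
instance (n_pixels : Int) (n_segments : Int) (out : List (List Int)) : Decidable (Spec_split_led_into_segments n_pixels n_segments out) := by unfold Spec_split_led_into_segments; infer_instance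

-- ===== CLAIM (what is proved, stated in full; the proofs are below) =====
def Claim_equal_split_led_into_segments : Prop := ∀ (n_pixels : Int) (n_segments : Int), Dom_split_led_into_segments n_pixels n_segments → Pre_split_led_into_segments n_pixels n_segments → Spec_split_led_into_segments n_pixels n_segments (split_led_into_segments n_pixels n_segments)

-- ===== LEMMAS AND PROOFS =====

-- slicing of range(0, n) with in-range bounds is range(a, b)
lemma slice_pyRange (n a b : Int) (h0 : 0 ≤ a) (hab : a ≤ b) (hb : b ≤ max n 0) :
    PySem.List.slice (PySem.List.pyRange 0 n 1) (some a) (some b) = PySem.List.pyRange a b 1 := by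
  by_cases hn : n ≤ 0
  · have ha0 : a = 0 := by omega
    have hb0 : b = 0 := by omega
    subst ha0; subst hb0
    simp only [PySem.List.pyRange_one_eq_nil hn, PySem.List.slice_zero_start]
    rw [PySem.List.slice_to]
    · simp
    · exact le_rfl
  · have hbn : b ≤ n := by omega
    rw [PySem.List.slice_toNat _ h0 (by omega)]
    rw [PySem.List.pyRange_one_append 0 a n h0 (by omega),
        PySem.List.pyRange_one_append a b n hab hbn]
    rw [List.drop_left' (by simp [PySem.List.length_pyRange_one]; try omega)]
    rw [List.take_left' (by simp [PySem.List.length_pyRange_one]; try omega)]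

-- the cursor fold of B, started at cursor j*k + min j m, produces the closed-form segments
lemma cursor_fold (k m s : Int) (hm : 0 ≤ m) :
    ∀ (j : Int) (acc : List (List Int)),
    ((PySem.List.pyRange j s 1).foldl
      (fun (acc : List (List Int) × Int) i =>
        let size := if i < m then k + 1 else k
        (acc.1 ++ [PySem.List.pyRange acc.2 (acc.2 + size) 1], acc.2 + size))
      (acc, j * k + min j m)).1
    = acc ++ (PySem.List.pyRange j s 1).map (fun i =>
        PySem.List.pyRange (i * k + min i m) ((i + 1) * k + min (i + 1) m) 1) := by
  intro j acc
  by_cases hjs : s ≤ j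
  · simp [PySem.List.pyRange_one_eq_nil hjs]
  · rw [PySem.List.pyRange_one_cons (by omega)]
    have hstep : j * k + min j m + (if j < m then k + 1 else k) = (j + 1) * k + min (j + 1) m := by
      have hmin : min (j + 1) m = min j m + (if j < m then 1 else 0) := by
        split_ifs <;> omega
      have hjk : (j + 1) * k = j * k + k := by ring
      rw [hmin, hjk]; split_ifs <;> ring
    simp only [List.foldl_cons, List.map_cons]
    rw [show (acc, j * k + min j m).1 ++
          [PySem.List.pyRange (acc, j * k + min j m).2
            ((acc, j * k + min j m).2 + if j < m then k + 1 else k) 1] =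
        acc ++ [PySem.List.pyRange (j * k + min j m) ((j + 1) * k + min (j + 1) m) 1] from by
          rw [← hstep]]
    rw [show (acc, j * k + min j m).2 + (if j < m then k + 1 else k) = (j + 1) * k + min (j + 1) m
        from hstep]
    rw [cursor_fold k m s hm (j + 1) (acc ++ [_])]
    simp
termination_by j _ => (s - j).toNat
decreasing_by omega

-- ===== VERDICT (by name: the statement is the Claim_ definition above) =====
theorem split_led_into_segments_spec : Claim_equal_split_led_into_segments := by
  intro n s _ hpre
  have hs0 : s ≠ 0 := hpre
  unfold Spec_split_led_into_segments split_led_into_segments split_led_into_segments_alt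
  have hlen : ((n.toNat : Int)) = max n 0 := by omega
  rw [hlen]
  rcases h : PySem.Int.divmod? (max n 0) s with _ | ⟨k, m⟩
  · rfl
  · -- s ≠ 0; divmod gives k = floordiv, m = mod
    have hdm : k = PySem.Int.floordiv (max n 0) s ∧ m = PySem.Int.mod (max n 0) s := by
      simp [PySem.Int.divmod?, hs0] at h
      exact ⟨h.1.symm, h.2.symm⟩
    rcases (by omega : s < 0 ∨ 0 < s) with hs | hs
    · -- s < 0: loop range empty on both sides
      simp [PySem.List.pyRange_one_eq_nil (le_of_lt hs)]
    · -- s > 0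
      have hT : 0 ≤ max n 0 := le_max_right n 0
      have hm0 : 0 ≤ m := hdm.2 ▸ PySem.Int.mod_nonneg _ hs
      have hms : m < s := hdm.2 ▸ PySem.Int.mod_lt _ hs
      have hk0 : 0 ≤ k := by
        rw [hdm.1, PySem.Int.le_floordiv_iff_mul_le hs]
        simp [hT]
      have hTeq : k * s + m = max n 0 := by
        rw [hdm.1, hdm.2]; exact PySem.Int.floordiv_mul_add_mod _ _
      dsimp only
      have hc := cursor_fold k m s hm0 0 []
      rw [show (0 : Int) * k + min 0 m = 0 by simp [min_eq_left hm0]] at hc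
      rw [hc, List.nil_append]
      apply List.map_congr_left
      intro i hi
      rw [PySem.List.mem_pyRange_one] at hi
      apply slice_pyRange
      · have h1 : 0 ≤ i * k := mul_nonneg hi.1 hk0
        have h2 : 0 ≤ min i m := le_min hi.1 hm0
        linarith
      · have h1 : (i + 1) * k = i * k + k := by ring
        have h2 : min i m ≤ min (i + 1) m := by omega
        linarith
      · have h1 : (i + 1) * k ≤ s * k := mul_le_mul_of_nonneg_right (by omega) hk0
        have h2 : min (i + 1) m ≤ m := min_le_right _ _
        have h3 : s * k = k * s := mul_comm s k
        linarith
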